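-- pv_equiv track=rewrite | github.com/Mzzkc/mozart-ai-compose | src/mozart/dashboard/auth/security.py | validate_job_id
-- ===== SOURCE A (Python) =====
-- MAX_JOB_ID_LENGTH = 256
--
-- def validate_job_id(job_id: str) -> bool:
--     """Validate job ID format to prevent injection.
--
--     Args:
--         job_id: Job identifier to validate
--
--     Returns:
--         True if valid format
--     """
--     if not job_id or len(job_id) > MAX_JOB_ID_LENGTH:
--         return False
--
--     # Allow alphanumeric, hyphen, underscore, period
--     allowed_chars = set(
--         "abcdefghijklmnopqrstuvwxyz"
--         "ABCDEFGHIJKLMNOPQRSTUVWXYZ"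
--         "0123456789-_."
--     )
--     return all(c in allowed_chars for c in job_id)
-- ===== SOURCE B (Python) =====
-- import re
--
-- MAX_JOB_ID_LENGTH = 256
--
-- _JOB_ID_RE = re.compile(r'[A-Za-z0-9_.-]+')
--
-- def validate_job_id(job_id: str) -> bool:
--     """Validate job ID format to prevent injection."""
--     if not job_id or len(job_id) > MAX_JOB_ID_LENGTH:
--         return False
--     return _JOB_ID_RE.fullmatch(job_id) is not None
-- ===== Notes on version B (the rewrite author's own statement) =====
-- stated objective: idiomatic
-- what changed: Replaced the per-character membership test against a 65-element set built on every call with a single anchored regex fullmatch over the whole string.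
import Mathlib
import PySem

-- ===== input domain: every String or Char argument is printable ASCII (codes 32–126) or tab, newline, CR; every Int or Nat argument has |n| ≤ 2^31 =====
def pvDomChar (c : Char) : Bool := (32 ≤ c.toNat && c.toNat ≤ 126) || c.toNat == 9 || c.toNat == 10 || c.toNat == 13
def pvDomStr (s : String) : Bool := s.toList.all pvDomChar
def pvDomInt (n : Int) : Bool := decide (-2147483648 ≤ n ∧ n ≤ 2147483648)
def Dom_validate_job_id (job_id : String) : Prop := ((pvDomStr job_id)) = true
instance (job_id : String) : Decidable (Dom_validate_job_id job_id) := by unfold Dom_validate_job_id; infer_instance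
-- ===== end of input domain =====

-- B replaces A's per-character membership test against a 65-element set built on every call
-- with a single anchored regex fullmatch (re.fullmatch(r'[A-Za-z0-9_.-]+', ...)); same result on every string.

-- ===== PORT A =====
-- MAX_JOB_ID_LENGTH = 256
def MAX_JOB_ID_LENGTH : Int := 256

-- the literal characters of A's allowed_chars string
def allowedChars : List Char :=
  "abcdefghijklmnopqrstuvwxyzABCDEFGHIJKLMNOPQRSTUVWXYZ0123456789-_.".toList

def validate_job_id (job_id : String) : Bool :=
  if job_id.toList.isEmpty || PySem.Str.len job_id > MAX_JOB_ID_LENGTH then false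
  else
    let allowed_chars := PySem.Set.ofList allowedChars
    job_id.toList.all (fun c => PySem.Set.contains allowed_chars c)

-- ===== PORT B =====
-- one step of the regex automaton for the class [A-Za-z0-9_.-]
def jobIdChar (c : Char) : Bool :=
  ('A' ≤ c && c ≤ 'Z') || ('a' ≤ c && c ≤ 'z') || ('0' ≤ c && c ≤ '9')
    || c == '_' || c == '.' || c == '-'

def validate_job_id_alt (job_id : String) : Bool :=
  if job_id.toList.isEmpty || PySem.Str.len job_id > MAX_JOB_ID_LENGTH then false
  else
    -- re.fullmatch(r'[A-Za-z0-9_.-]+', job_id) is not None: under the guard the string is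
    -- nonempty, so the anchored '+'-match succeeds iff every character matches the class.
    job_id.toList.all jobIdChar

-- ===== PRECONDITION & SPEC =====
def Spec_validate_job_id (job_id : String) (out : Bool) : Prop := out = validate_job_id_alt job_id
instance (job_id : String) (out : Bool) : Decidable (Spec_validate_job_id job_id out) := by unfold Spec_validate_job_id; infer_instance

-- ===== CLAIM (what is proved, stated in full; the proofs are below) =====
def Claim_equal_validate_job_id : Prop := ∀ (job_id : String), Dom_validate_job_id job_id → Spec_validate_job_id job_id (validate_job_id job_id)

-- ===== LEMMAS AND PROOFS =====
-- membership in A's allowed set coincides with B's character-class test, for every Char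
theorem allowed_eq_jobIdChar (c : Char) :
    PySem.Set.contains (PySem.Set.ofList allowedChars) c = jobIdChar c := by
  have h1 : (PySem.Set.contains (PySem.Set.ofList allowedChars) c = true) ↔ c ∈ allowedChars := by
    simp [PySem.Set.contains, PySem.Set.mem_ofList]
  have hl : allowedChars = ['a', 'b', 'c', 'd', 'e', 'f', 'g', 'h', 'i', 'j', 'k', 'l', 'm', 'n', 'o', 'p', 'q', 'r', 's', 't', 'u', 'v', 'w', 'x', 'y', 'z', 'A', 'B', 'C', 'D', 'E', 'F', 'G', 'H', 'I', 'J', 'K', 'L', 'M', 'N', 'O', 'P', 'Q', 'R', 'S', 'T', 'U', 'V', 'W', 'X', 'Y', 'Z', '0', '1', '2', '3', '4', '5', '6', '7', '8', '9', '-', '_', '.'] := rfl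
  have h2 : c ∈ allowedChars ↔ (jobIdChar c = true) := by
    rw [hl]
    simp only [jobIdChar, List.mem_cons, List.not_mem_nil, or_false, Char.le_def,
      UInt32.le_iff_toNat_le, Bool.or_eq_true, Bool.and_eq_true, decide_eq_true_eq,
      beq_iff_eq, Char.ext_iff, ← UInt32.toNat_inj, show ('a':Char).val.toNat = 97 from rfl, show ('b':Char).val.toNat = 98 from rfl, show ('c':Char).val.toNat = 99 from rfl, show ('d':Char).val.toNat = 100 from rfl, show ('e':Char).val.toNat = 101 from rfl, show ('f':Char).val.toNat = 102 from rfl, show ('g':Char).val.toNat = 103 from rfl, show ('h':Char).val.toNat = 104 from rfl, show ('i':Char).val.toNat = 105 from rfl, show ('j':Char).val.toNat = 106 from rfl, show ('k':Char).val.toNat = 107 from rfl, show ('l':Char).val.toNat = 108 from rfl, show ('m':Char).val.toNat = 109 from rfl, show ('n':Char).val.toNat = 110 from rfl, show ('o':Char).val.toNat = 111 from rfl, show ('p':Char).val.toNat = 112 from rfl, show ('q':Char).val.toNat = 113 from rfl, show ('r':Char).val.toNat = 114 from rfl, show ('s':Char).val.toNat = 115 from rfl, show ('t':Char).val.toNat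 = 116 from rfl, show ('u':Char).val.toNat = 117 from rfl, show ('v':Char).val.toNat = 118 from rfl, show ('w':Char).val.toNat = 119 from rfl, show ('x':Char).val.toNat = 120 from rfl, show ('y':Char).val.toNat = 121 from rfl, show ('z':Char).val.toNat = 122 from rfl, show ('A':Char).val.toNat = 65 from rfl, show ('B':Char).val.toNat = 66 from rfl, show ('C':Char).val.toNat = 67 from rfl, show ('D':Char).val.toNat = 68 from rfl, show ('E':Char).val.toNat = 69 from rfl, show ('F':Char).val.toNat = 70 from rfl, show ('G':Char).val.toNat = 71 from rfl, show ('H':Char).val.toNat = 72 from rfl, show ('I':Char).val.toNat = 73 from rfl, show ('J':Char).val.toNat = 74 from rfl, show ('K':Char).val.toNat = 75 from rfl, show ('L':Char).val.toNat = 76 from rfl, show ('M':Char).val.toNat = 77 from rfl, show ('N':Char).val.toNat = 78 from rfl, show ('O':Char).val.toNat = 79 from rfl, show ('P':Char).val.toNat = 80 from rfl, show ('Q':Char).val.toNat = 81 from rfl, show ('R':Char).val.toNat = 82 from rfl, show ('S':Char).val.toNat = 83 from rfl, show ('T':Char).val.toNat = 84 from rfl, show ('U':Char).val.toNat = 85 from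 rfl, show ('V':Char).val.toNat = 86 from rfl, show ('W':Char).val.toNat = 87 from rfl, show ('X':Char).val.toNat = 88 from rfl, show ('Y':Char).val.toNat = 89 from rfl, show ('Z':Char).val.toNat = 90 from rfl, show ('0':Char).val.toNat = 48 from rfl, show ('1':Char).val.toNat = 49 from rfl, show ('2':Char).val.toNat = 50 from rfl, show ('3':Char).val.toNat = 51 from rfl, show ('4':Char).val.toNat = 52 from rfl, show ('5':Char).val.toNat = 53 from rfl, show ('6':Char).val.toNat = 54 from rfl, show ('7':Char).val.toNat = 55 from rfl, show ('8':Char).val.toNat = 56 from rfl, show ('9':Char).val.toNat = 57 from rfl, show ('-':Char).val.toNat = 45 from rfl, show ('_':Char).val.toNat = 95 from rfl, show ('.':Char).val.toNat = 46 from rfl]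
    omega
  rw [Bool.eq_iff_iff, h1, h2]

-- ===== VERDICT (by name: the statement is the Claim_ definition above) =====
theorem validate_job_id_spec : Claim_equal_validate_job_id := by
  intro job_id _
  unfold Spec_validate_job_id
  simp only [validate_job_id, validate_job_id_alt]
  rw [show (fun c => PySem.Set.contains (PySem.Set.ofList allowedChars) c) = jobIdChar
      from funext allowed_eq_jobIdChar]
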